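-- pv_equiv track=rewrite | github.com/bashrc2/epicyon | categories.py | _valid_hashtag_category
-- ===== SOURCE A (Python) =====
-- INVALID_HASHTAG_CHARS = (',', ' ', '<', ';', '\\', '"', '&', '#')
--
-- def _valid_hashtag_category(category: str) -> bool:
--     """Returns true if the category name is valid
--     """
--     if not category:
--         return False
--
--     for char in INVALID_HASHTAG_CHARS:
--         if char in category:
--             return False
--
--     # too long
--     if len(category) > 40:
--         return False
--
--     return True
-- ===== SOURCE B (Python) =====
-- INVALID_HASHTAG_CHARS = (',', ' ', '<', ';', '\\', '"', '&', '#')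
--
-- def _valid_hashtag_category(category: str) -> bool:
--     """Returns true if the category name is valid"""
--     if not category or len(category) > 40:
--         return False
--     bad = set(INVALID_HASHTAG_CHARS)
--     return all(ch not in bad for ch in category)
-- ===== Notes on version B (the rewrite author's own statement) =====
-- stated objective: simpler
-- what changed: Replaces the 8 substring scans over the input with a single pass over the input's characters testing each against a set of the invalid characters, and folds the two guards into one early return.
import Mathlib
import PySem

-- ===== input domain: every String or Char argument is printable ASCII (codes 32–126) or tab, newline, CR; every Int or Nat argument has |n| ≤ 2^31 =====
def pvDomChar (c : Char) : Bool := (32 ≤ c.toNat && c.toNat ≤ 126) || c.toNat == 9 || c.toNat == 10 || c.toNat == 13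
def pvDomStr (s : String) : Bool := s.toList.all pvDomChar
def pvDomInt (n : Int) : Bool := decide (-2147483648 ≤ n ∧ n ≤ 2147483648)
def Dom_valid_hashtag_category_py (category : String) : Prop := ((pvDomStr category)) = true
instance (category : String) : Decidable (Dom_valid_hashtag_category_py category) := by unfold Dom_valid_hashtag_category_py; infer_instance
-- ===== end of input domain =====

-- B changes the traversal: one pass over the input's characters against a set of invalid
-- characters, instead of A's eight substring scans (objective: simpler).

-- ===== PORT A =====
def pvInvalidHashtagChars : List String := [",", " ", "<", ";", "\\", "\"", "&", "#"]

-- early-return loop over the 8 invalid strings: True as soon as one is a substring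
def pvLoopA : List String → String → Bool
  | [], _ => false
  | ch :: rest, s => if PySem.Str.isIn ch s then true else pvLoopA rest s

def valid_hashtag_category_py (category : String) : Bool :=
  if category.toList.isEmpty then false
  else if pvLoopA pvInvalidHashtagChars category then false
  else if 40 < PySem.Str.len category then false
  else true

-- ===== PORT B =====
def pvBadSet : PySem.Set Char := PySem.Set.ofList [',', ' ', '<', ';', '\\', '"', '&', '#']

def valid_hashtag_category_py_alt (category : String) : Bool :=
  if category.toList.isEmpty || 40 < PySem.Str.len category then false
  else category.toList.all (fun ch => !(PySem.Set.contains pvBadSet ch))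

-- ===== PRECONDITION & SPEC =====
def Spec_valid_hashtag_category_py (category : String) (out : Bool) : Prop := out = valid_hashtag_category_py_alt category
instance (category : String) (out : Bool) : Decidable (Spec_valid_hashtag_category_py category out) := by unfold Spec_valid_hashtag_category_py; infer_instance

-- ===== CLAIM (what is proved, stated in full; the proofs are below) =====
def Claim_equal_valid_hashtag_category_py : Prop := ∀ (category : String), Dom_valid_hashtag_category_py category → Spec_valid_hashtag_category_py category (valid_hashtag_category_py category)

-- ===== LEMMAS AND PROOFS =====

-- A's early-return loop is List.any over the invalid strings
lemma pvLoopA_any (l : List String) (s : String) :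
    pvLoopA l s = l.any (fun ch => PySem.Str.isIn ch s) := by
  induction l with
  | nil => rfl
  | cons c rest ih =>
    simp only [pvLoopA, List.any_cons, ih]
    split <;> simp_all

-- a one-character substring test is character membership
lemma pv_isIn_single (c : Char) (s : String) :
    PySem.Str.isIn (String.ofList [c]) s = s.toList.contains c := by
  rw [Bool.eq_iff_iff]
  simp [PySem.Str.isIn_eq, PySem.Chars.isIn_iff_infix, List.singleton_infix_iff]

-- A's loop finds an invalid substring iff some character of the input lies in B's bad set
lemma pvLoopA_eq (s : String) :
    pvLoopA pvInvalidHashtagChars s = s.toList.any (fun ch => PySem.Set.contains pvBadSet ch) := by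
  have h8 : pvInvalidHashtagChars = [String.ofList [','], String.ofList [' '],
      String.ofList ['<'], String.ofList [';'], String.ofList ['\\'],
      String.ofList ['"'], String.ofList ['&'], String.ofList ['#']] := by decide
  have hb : pvBadSet = [',', ' ', '<', ';', '\\', '"', '&', '#'] := by decide
  rw [pvLoopA_any, h8, Bool.eq_iff_iff]
  simp only [List.any_cons, List.any_nil, pv_isIn_single, Bool.or_eq_true,
    List.any_eq_true, hb, PySem.Set.contains_eq_listContains, List.contains_eq_mem,
    decide_eq_true_eq, List.mem_cons, List.not_mem_nil, or_false]
  aesop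

theorem pv_main (category : String) :
    valid_hashtag_category_py category = valid_hashtag_category_py_alt category := by
  unfold valid_hashtag_category_py valid_hashtag_category_py_alt
  rw [pvLoopA_eq]
  cases h : category.toList.isEmpty <;>
    cases h3 : category.toList.any (fun ch => PySem.Set.contains pvBadSet ch) <;>
      simp_all [List.all_eq_not_any_not, Bool.not_not, List.isEmpty_iff]

-- ===== VERDICT (by name: the statement is the Claim_ definition above) =====
theorem valid_hashtag_category_py_spec : Claim_equal_valid_hashtag_category_py := by
  intro category _
  unfold Spec_valid_hashtag_category_py
  exact pv_main category
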